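-- pv_equiv track=rewrite | github.com/tsunehiko/rlgdg | src/ggdg/rule_decoding.py | add_brackets
-- ===== SOURCE A (Python) =====
-- def add_brackets(clause):
--     if clause[-1] in ["+", "?"]:
--         if clause[-2] == ")":
--             return f"{add_brackets(clause[:-2])}){clause[-1]}"
--         else:
--             return f"({add_brackets(clause[:-1])}){clause[-1]}"
--     else:
--         return clause
-- ===== SOURCE B (Python) =====
-- def add_brackets(clause):
--     # Iterative: peel trailing +/? modifiers from the end, then rebuild.
--     mods = []
--     while clause and clause[-1] in "+?":
--         m = clause[-1]
--         if len(clause) >= 2 and clause[-2] == ")":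
--             mods.append((m, True))
--             clause = clause[:-2]
--         else:
--             mods.append((m, False))
--             clause = clause[:-1]
--     for m, wrapped in reversed(mods):
--         if wrapped:
--             clause = clause + ")" + m
--         else:
--             clause = "(" + clause + ")" + m
--     return clause
-- ===== Notes on version B (the rewrite author's own statement) =====
-- stated objective: alternative
-- what changed: Replaces A's recursion (which re-examines the string's tail and rebuilds via recursive calls) by an explicit two-phase iteration: a while loop peels trailing +/? modifiers into a list of (modifier, had-paren) records, then a second loop rebuilds the bracketed string from innermost to outermost.
-- crash fix: A raises IndexError exactly on the strings consisting only of '+', '?' and ')' in which every ')' is immediately followed by '+' or '?' (including the empty string); B's natural guarded loop returns a value there, e.g. B('+') = '()+'. — e.g. on add_brackets("+"): A raises IndexError, B returns "()+"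
import Mathlib
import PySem

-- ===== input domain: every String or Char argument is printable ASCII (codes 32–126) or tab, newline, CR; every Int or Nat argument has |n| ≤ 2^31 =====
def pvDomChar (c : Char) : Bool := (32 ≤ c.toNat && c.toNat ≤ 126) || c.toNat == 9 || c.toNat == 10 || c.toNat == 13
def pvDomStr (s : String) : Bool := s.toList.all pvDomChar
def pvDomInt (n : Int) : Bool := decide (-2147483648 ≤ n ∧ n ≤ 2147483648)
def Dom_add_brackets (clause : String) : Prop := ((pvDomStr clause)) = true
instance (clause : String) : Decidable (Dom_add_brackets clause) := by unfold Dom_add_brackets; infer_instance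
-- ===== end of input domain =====

-- B replaces A's recursion by an explicit peel-then-rebuild iteration (alternative decomposition, same cost).

-- ===== PORT A =====
-- Literal transliteration of A on code points (clause.toList); where Python raises
-- IndexError (pyGet? = none) the port returns [] — exactly those inputs are excluded by Pre_.
def addBracketsA (l : List Char) : List Char :=
  match h1 : PySem.List.pyGet? l (-1) with
  | none => []                                  -- clause[-1]: IndexError
  | some c =>
    if c = '+' ∨ c = '?' then
      match PySem.List.pyGet? l (-2) with
      | none => []                              -- clause[-2]: IndexError
      | some d =>
        if d = ')' then
          addBracketsA (PySem.List.slice l none (some (-2))) ++ [')'] ++ [c]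
        else
          ['('] ++ addBracketsA (PySem.List.slice l none (some (-1))) ++ [')'] ++ [c]
    else l
termination_by l.length
decreasing_by
  · have hl : l ≠ [] := by
      rintro rfl; rw [PySem.List.pyGet?_neg_one] at h1; simp at h1
    have h0 : 0 < l.length := List.length_pos_iff.mpr hl
    rw [PySem.List.slice_to_neg_ofNat l 2 (by omega)]
    simp; omega
  · have hl : l ≠ [] := by
      rintro rfl; rw [PySem.List.pyGet?_neg_one] at h1; simp at h1
    have h0 : 0 < l.length := List.length_pos_iff.mpr hl
    rw [PySem.List.slice_to_neg_one]
    simp; omega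

def add_brackets (clause : String) : String := String.ofList (addBracketsA clause.toList)

-- ===== PORT B =====
-- while-loop of Source B, as recursion over the REVERSED character list: peel each trailing
-- '+'/'?' together with the flag "was it preceded by ')'", returning the records in peel
-- order and the (reversed) unconsumed core.
def peelB : List Char → List (Char × Bool) × List Char
  | [] => ([], [])
  | [c] =>
    if c = '+' ∨ c = '?' then ([(c, false)], []) else ([], [c])
  | c :: d :: t =>
    if c = '+' ∨ c = '?' then
      if d = ')' then                           -- len(clause) >= 2 and clause[-2] == ")"
        let r := peelB t
        ((c, true) :: r.1, r.2)
      else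
        let r := peelB (d :: t)
        ((c, false) :: r.1, r.2)
    else ([], c :: d :: t)

-- one step of Source B's rebuild loop
def rebuildStep (acc : List Char) (m : Char × Bool) : List Char :=
  if m.2 then acc ++ [')'] ++ [m.1] else ['('] ++ acc ++ [')'] ++ [m.1]

def add_brackets_alt (clause : String) : String :=
  let p := peelB clause.toList.reverse
  String.ofList ((p.1.reverse).foldl rebuildStep p.2.reverse)

-- ===== PRECONDITION & SPEC =====
-- holds iff the string consists only of '+', '?', ')' chars, every ')' is immediately
-- followed by '+' or '?', and the string does not end in ')'
def ModsClosed (l : List Char) : Prop :=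
  l.all (fun c => c == '+' || c == '?' || c == ')') = true ∧
  List.IsChain (fun a b => a = ')' → b = '+' ∨ b = '?') l ∧
  l.getLast? ≠ some ')'

-- Pre_ excludes exactly the inputs on which A raises IndexError: the strings (including "")
-- made only of '+', '?', ')' in which every ')' is immediately followed by '+' or '?'.
def Pre_add_brackets (clause : String) : Prop := ¬ ModsClosed clause.toList
instance (clause : String) : Decidable (Pre_add_brackets clause) := by unfold Pre_add_brackets ModsClosed; infer_instance

def pvWitness_add_brackets : String := "a+"

-- A raises IndexError exactly on the strings of '+','?',')' where every ')' is immediately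
-- followed by '+' or '?' (including ""); B's guarded loop returns a value there.
def Raises_add_brackets (clause : String) : Prop := ModsClosed clause.toList
instance (clause : String) : Decidable (Raises_add_brackets clause) := by unfold Raises_add_brackets ModsClosed; infer_instance
def pvRaiseWitness_add_brackets : String := "+"
def pvRaiseWitnessOut_add_brackets : String := "()+"

def Spec_add_brackets (clause : String) (out : String) : Prop := out = add_brackets_alt clause
instance (clause : String) (out : String) : Decidable (Spec_add_brackets clause out) := by unfold Spec_add_brackets; infer_instance

-- ===== CLAIM (what is proved, stated in full; the proofs are below) =====
def Claim_equal_add_brackets : Prop := ∀ (clause : String), Dom_add_brackets clause → Pre_add_brackets clause → Spec_add_brackets clause (add_brackets clause)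
def Claim_raises_add_brackets : Prop := (∀ (clause : String), Dom_add_brackets clause → Raises_add_brackets clause → ¬ Pre_add_brackets clause) ∧ (Dom_add_brackets (pvRaiseWitness_add_brackets) ∧ Raises_add_brackets (pvRaiseWitness_add_brackets) ∧ add_brackets_alt (pvRaiseWitness_add_brackets) = pvRaiseWitnessOut_add_brackets)

-- ===== LEMMAS AND PROOFS =====

-- Bool recursion equivalent to ModsClosed, shaped for the inductions below
def allModsClose : List Char → Bool
  | [] => true
  | [c] => c = '+' || c = '?'
  | c :: d :: t =>
      (if c = ')' then (d = '+' || d = '?') else (c = '+' || c = '?')) && allModsClose (d :: t)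

lemma allModsClose_iff (l : List Char) : allModsClose l = true ↔ ModsClosed l := by
  induction l using allModsClose.induct with
  | case1 => simp [allModsClose, ModsClosed]
  | case2 c =>
      by_cases h1 : c = '+' <;> by_cases h2 : c = '?' <;> by_cases h3 : c = ')' <;>
        simp_all [allModsClose, ModsClosed]
  | case3 c d t ih =>
      rw [ModsClosed] at ih ⊢
      by_cases hc : c = ')' <;>
        by_cases hd : d = '+' ∨ d = '?' <;>
          simp_all [allModsClose, List.isChain_cons_cons] <;> tauto


lemma allModsClose_append_close (p : List Char) (m : Char) (hm : m = '+' ∨ m = '?') :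
    allModsClose (p ++ [')', m]) = allModsClose p := by
  induction p using allModsClose.induct with
  | case1 => rcases hm with rfl | rfl <;> decide
  | case2 c =>
      rcases hm with rfl | rfl <;>
        (by_cases hc : c = ')' <;> simp [allModsClose, hc])
  | case3 c d t ih =>
      have : (c :: d :: t) ++ [')', m] = c :: d :: (t ++ [')', m]) := by simp
      rw [this]
      have h2 : d :: (t ++ [')', m]) = (d :: t) ++ [')', m] := by simp
      simp only [allModsClose, h2, ih]

lemma allModsClose_append_mod (p : List Char) (d m : Char) (hm : m = '+' ∨ m = '?')
    (hd : p.getLast? = some d) (hdne : d ≠ ')') :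
    allModsClose (p ++ [m]) = allModsClose p := by
  induction p using allModsClose.induct with
  | case1 => simp at hd
  | case2 c =>
      simp at hd
      subst hd
      rcases hm with rfl | rfl <;> simp [allModsClose, hdne]
  | case3 c e t ih =>
      have hd' : (e :: t).getLast? = some d := by
        simpa using hd
      have : (c :: e :: t) ++ [m] = c :: e :: (t ++ [m]) := by simp
      rw [this]
      have h2 : e :: (t ++ [m]) = (e :: t) ++ [m] := by simp
      simp only [allModsClose, h2, ih hd']

-- the heart of the equivalence: A on the string equals B's rebuild of B's peel,
-- phrased over the reversed character list r (so that peeling is structural).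
lemma keyA : ∀ (n : Nat) (r : List Char), r.length ≤ n → allModsClose r.reverse = false →
    addBracketsA r.reverse = ((peelB r).1.reverse).foldl rebuildStep (peelB r).2.reverse := by
  intro n
  induction n with
  | zero =>
      intro r hr h
      have hr0 : r = [] := List.length_eq_zero_iff.mp (Nat.le_zero.mp hr)
      subst hr0
      simp [allModsClose] at h
  | succ n ih =>
      intro r hr h
      match r with
      | [] => simp [allModsClose] at h
      | c :: t =>
        by_cases hc : c = '+' ∨ c = '?'
        · -- last char is a modifier
          match t with
          | [] =>
              exfalso
              rcases hc with rfl | rfl <;> simp [allModsClose] at h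
          | d :: u =>
            by_cases hd : d = ')'
            · subst hd
              -- A side
              have hrev : (c :: ')' :: u).reverse = u.reverse ++ [')', c] := by simp
              have hlen : (u.reverse ++ [')', c]).length = u.length + 2 := by simp
              have hget1 : PySem.List.pyGet? (u.reverse ++ [')', c]) (-1) = some c := by
                have : u.reverse ++ [')', c] = (u.reverse ++ [')']) ++ [c] := by simp
                rw [this, PySem.List.pyGet?_neg_one_append_singleton]
              have hget2 : PySem.List.pyGet? (u.reverse ++ [')', c]) (-2) = some ')' := by
                rw [PySem.List.pyGet?_neg_ofNat _ 2 (by omega) (by simp)]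
                rw [hlen]
                simp
              have hslice : PySem.List.slice (u.reverse ++ [')', c]) none (some (-2)) = u.reverse := by
                rw [PySem.List.slice_to_neg_ofNat _ 2 (by omega), hlen]
                simpa using List.take_left' (l₂ := [')', c]) (rfl : u.reverse.length = u.length)
              have hpre : allModsClose u.reverse = false := by
                rw [hrev, allModsClose_append_close u.reverse c hc] at h
                exact h
              have hA : addBracketsA ((c :: ')' :: u).reverse)
                  = addBracketsA u.reverse ++ [')'] ++ [c] := by
                rw [hrev]
                rw [addBracketsA]
                rw [hget1]
                simp only [hc, if_pos, hget2, hslice]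
              -- B side
              have hB : peelB (c :: ')' :: u) = ((c, true) :: (peelB u).1, (peelB u).2) := by
                simp [peelB, hc]
              rw [hA, hB]
              have ihu := ih u (by simp at hr ⊢; omega) hpre
              simp only [List.reverse_cons, List.foldl_append]
              rw [← ihu]
              simp [rebuildStep]
            · -- previous char is not ')'
              have hrev : (c :: d :: u).reverse = (d :: u).reverse ++ [c] := by simp
              have hget1 : PySem.List.pyGet? ((d :: u).reverse ++ [c]) (-1) = some c :=
                PySem.List.pyGet?_neg_one_append_singleton _ _
              have hlast : ((d :: u).reverse ++ [c]) = u.reverse ++ [d, c] := by simp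
              have hget2 : PySem.List.pyGet? ((d :: u).reverse ++ [c]) (-2) = some d := by
                rw [hlast]
                rw [PySem.List.pyGet?_neg_ofNat _ 2 (by omega) (by simp)]
                have hlen : (u.reverse ++ [d, c]).length = u.length + 2 := by simp
                rw [hlen]
                simp
              have hslice : PySem.List.slice ((d :: u).reverse ++ [c]) none (some (-1))
                  = (d :: u).reverse := by
                rw [PySem.List.slice_to_neg_one]
                simp
              have hpre : allModsClose (d :: u).reverse = false := by
                rw [hrev, allModsClose_append_mod (d :: u).reverse d c hc (by simp) hd] at h
                exact h
              have hA : addBracketsA ((c :: d :: u).reverse)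
                  = ['('] ++ addBracketsA ((d :: u).reverse) ++ [')'] ++ [c] := by
                rw [hrev]
                rw [addBracketsA]
                rw [hget1]
                simp only [hc, if_pos, hget2, hslice]
                simp [hc, hd]
              have hB : peelB (c :: d :: u) = ((c, false) :: (peelB (d :: u)).1, (peelB (d :: u)).2) := by
                simp [peelB, hc, hd]
              rw [hA, hB]
              have ihu := ih (d :: u) (by simp at hr ⊢; omega) hpre
              simp only [List.reverse_cons, List.foldl_append]
              rw [← ihu]
              simp [rebuildStep]
        · -- last char is not a modifier: both return the string unchanged
          have hget1 : PySem.List.pyGet? (t.reverse ++ [c]) (-1) = some c :=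
            PySem.List.pyGet?_neg_one_append_singleton _ _
          have hA : addBracketsA ((c :: t).reverse) = (c :: t).reverse := by
            rw [List.reverse_cons, addBracketsA, hget1]
            simp [hc]
          have hB : peelB (c :: t) = ([], c :: t) := by
            match t with
            | [] => simp [peelB, hc]
            | d :: u => simp [peelB, hc]
          rw [hA, hB]
          simp

-- ===== VERDICT (by name: the statement is the Claim_ definition above) =====
theorem add_brackets_spec : Claim_equal_add_brackets := by
  intro clause _ hpre
  unfold Spec_add_brackets add_brackets add_brackets_alt
  have hb : allModsClose clause.toList = false := by
    rw [← Bool.not_eq_true, allModsClose_iff]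
    exact hpre
  have h := keyA clause.toList.reverse.length clause.toList.reverse (le_refl _)
    (by simpa using hb)
  simp only [List.reverse_reverse] at h
  rw [h]

@[simp]
theorem add_brackets_raises : Claim_raises_add_brackets := by
  unfold Claim_raises_add_brackets
  constructor
  · intro clause _ hr hp
    exact hp hr
  · refine ⟨by decide, ?_, by decide⟩
    unfold Raises_add_brackets ModsClosed
    have h : (pvRaiseWitness_add_brackets).toList = ['+'] := by decide
    rw [h]
    exact ⟨by simp, by simp, by simp⟩
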